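-- pv_equiv track=rewrite | github.com/rizksn/rzk-football-anubis | anubis/draft_engine/filters/positional_strategies.py | redraft_1qb_filter
-- ===== SOURCE A (Python) =====
-- from typing import List, Dict, Any
--
-- def redraft_1qb_filter(
--     candidates: List[Dict[str, Any]],
--     team_roster: List[Dict[str, Any]],
--     current_pick_number: int,
-- ) -> List[Dict[str, Any]]:
--     """
--     Redraft 1QB strategy:
--     - Max 2 QBs total, no 2nd QB before pick 120
--     - Max 2 TEs total, no 2nd TE before pick 100
--     """
--
--     def apply_cap(player_pool: List[Dict[str, Any]], position: str, max_count: int, delay_until: int) -> List[Dict[str, Any]]: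
--         players_at_pos = [p for p in team_roster if p.get("position") == position]
--
--         if not team_roster:
--             return player_pool
--
--         if len(players_at_pos) >= max_count:
--             return [p for p in player_pool if p.get("position") != position]
--
--         if len(players_at_pos) >= 1 and current_pick_number < delay_until:
--             return [p for p in player_pool if p.get("position") != position]
--
--         return player_pool
--
--
--     filtered = candidates
--     filtered = apply_cap(filtered, "QB", max_count=2, delay_until=120)
--     filtered = apply_cap(filtered, "TE", max_count=2, delay_until=100)
--     return filtered
-- ===== SOURCE B (Python) =====
-- def redraft_1qb_filter(candidates, team_roster, current_pick_number):
--     if not team_roster: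
--         return candidates
--     qb = te = 0
--     for p in team_roster:
--         pos = p.get("position")
--         if pos == "QB":
--             qb += 1
--         elif pos == "TE":
--             te += 1
--     banned = set()
--     if qb >= 2 or (qb >= 1 and current_pick_number < 120):
--         banned.add("QB")
--     if te >= 2 or (te >= 1 and current_pick_number < 100):
--         banned.add("TE")
--     return [c for c in candidates if c.get("position") not in banned]
-- ===== Notes on version B (the rewrite author's own statement) =====
-- stated objective: simpler
-- what changed: Replaces two sequential apply_cap passes (each rescanning the roster and rebuilding the candidate list) with one roster pass building QB/TE counts, a banned-positions set derived from them, and a single filtering comprehension over candidates.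
import Mathlib
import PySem

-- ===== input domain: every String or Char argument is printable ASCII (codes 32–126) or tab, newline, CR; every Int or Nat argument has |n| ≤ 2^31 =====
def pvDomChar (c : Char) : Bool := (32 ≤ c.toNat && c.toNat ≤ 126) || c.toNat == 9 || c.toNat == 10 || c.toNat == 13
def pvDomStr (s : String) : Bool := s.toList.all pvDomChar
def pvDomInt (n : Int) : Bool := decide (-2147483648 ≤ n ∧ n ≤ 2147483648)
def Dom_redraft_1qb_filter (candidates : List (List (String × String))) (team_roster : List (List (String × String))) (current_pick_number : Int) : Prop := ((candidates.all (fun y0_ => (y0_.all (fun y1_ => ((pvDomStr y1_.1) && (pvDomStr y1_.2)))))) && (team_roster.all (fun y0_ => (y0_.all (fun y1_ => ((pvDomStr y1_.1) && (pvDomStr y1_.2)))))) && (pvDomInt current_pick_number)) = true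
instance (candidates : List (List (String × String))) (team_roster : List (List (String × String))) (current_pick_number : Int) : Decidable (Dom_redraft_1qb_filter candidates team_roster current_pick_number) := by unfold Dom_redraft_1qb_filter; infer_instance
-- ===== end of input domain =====

-- B replaces A's two roster-rescanning filter passes by one counting pass, a banned set and a single filter over candidates (objective: simpler).

-- shared helper: p.get("position") on an assoc-list dict (first match)
def pvGetPos (p : List (String × String)) : Option String :=
  (p.find? (fun kv => kv.1 == "position")).map (·.2)

-- ===== PORT A =====
-- the inner closure apply_cap, with its captured team_roster / current_pick_number as parameters
def pvApplyCap (team_roster : List (List (String × String))) (current_pick_number : Int)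
    (player_pool : List (List (String × String))) (position : String)
    (max_count delay_until : Int) : List (List (String × String)) :=
  let players_at_pos := team_roster.filter (fun p => pvGetPos p == some position)
  if team_roster = [] then player_pool
  else if max_count ≤ (players_at_pos.length : Int) then
    player_pool.filter (fun p => !(pvGetPos p == some position))
  else if 1 ≤ (players_at_pos.length : Int) ∧ current_pick_number < delay_until then
    player_pool.filter (fun p => !(pvGetPos p == some position))
  else player_pool

def redraft_1qb_filter (candidates : List (List (String × String))) (team_roster : List (List (String × String))) (current_pick_number : Int) : List (List (String × String)) :=
  let filtered := candidates
  let filtered := pvApplyCap team_roster current_pick_number filtered "QB" 2 120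
  let filtered := pvApplyCap team_roster current_pick_number filtered "TE" 2 100
  filtered

-- ===== PORT B =====
-- the loop body of B's single counting pass over the roster
def pvCountStep (acc : Int × Int) (p : List (String × String)) : Int × Int :=
  let pos := pvGetPos p
  if pos = some "QB" then (acc.1 + 1, acc.2)
  else if pos = some "TE" then (acc.1, acc.2 + 1)
  else acc

def pvCounts (team_roster : List (List (String × String))) : Int × Int :=
  team_roster.foldl pvCountStep (0, 0)

def redraft_1qb_filter_alt (candidates : List (List (String × String))) (team_roster : List (List (String × String))) (current_pick_number : Int) : List (List (String × String)) :=
  if team_roster = [] then candidates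
  else
    let qb := (pvCounts team_roster).1
    let te := (pvCounts team_roster).2
    let banned : PySem.Set String := PySem.Set.empty
    let banned := if 2 ≤ qb ∨ (1 ≤ qb ∧ current_pick_number < 120) then PySem.Set.add banned "QB" else banned
    let banned := if 2 ≤ te ∨ (1 ≤ te ∧ current_pick_number < 100) then PySem.Set.add banned "TE" else banned
    candidates.filter (fun c =>
      match pvGetPos c with
      | some s => !(PySem.Set.contains banned s)
      | none => true)

-- ===== PRECONDITION & SPEC =====
def Spec_redraft_1qb_filter (candidates : List (List (String × String))) (team_roster : List (List (String × String))) (current_pick_number : Int) (out : List (List (String × String))) : Prop := out = redraft_1qb_filter_alt candidates team_roster current_pick_number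
instance (candidates : List (List (String × String))) (team_roster : List (List (String × String))) (current_pick_number : Int) (out : List (List (String × String))) : Decidable (Spec_redraft_1qb_filter candidates team_roster current_pick_number out) := by unfold Spec_redraft_1qb_filter; infer_instance

-- ===== CLAIM (what is proved, stated in full; the proofs are below) =====
def Claim_equal_redraft_1qb_filter : Prop := ∀ (candidates : List (List (String × String))) (team_roster : List (List (String × String))) (current_pick_number : Int), Dom_redraft_1qb_filter candidates team_roster current_pick_number → Spec_redraft_1qb_filter candidates team_roster current_pick_number (redraft_1qb_filter candidates team_roster current_pick_number)

-- ===== LEMMAS AND PROOFS =====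

-- the single counting pass equals the two filter-lengths A computes
theorem pvCounts_foldl (l : List (List (String × String))) (a b : Int) :
    l.foldl pvCountStep (a, b)
      = (a + ((l.filter (fun p => pvGetPos p == some "QB")).length : Int),
         b + ((l.filter (fun p => pvGetPos p == some "TE")).length : Int)) := by
  induction l generalizing a b with
  | nil => simp
  | cons p l ih =>
    rw [List.foldl_cons]
    rcases hpos : pvGetPos p with _ | s
    · have hstep : pvCountStep (a, b) p = (a, b) := by simp [pvCountStep, hpos]
      rw [hstep, ih]
      simp [hpos]
    · by_cases hq : s = "QB"
      · subst hq
        have hstep : pvCountStep (a, b) p = (a + 1, b) := by simp [pvCountStep, hpos]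
        rw [hstep, ih]
        simp [hpos]
        omega
      · by_cases ht : s = "TE"
        · subst ht
          have hstep : pvCountStep (a, b) p = (a, b + 1) := by simp [pvCountStep, hpos]
          rw [hstep, ih]
          simp [hpos]
          omega
        · have hstep : pvCountStep (a, b) p = (a, b) := by simp [pvCountStep, hpos, hq, ht]
          rw [hstep, ih]
          simp [hpos, hq, ht]

theorem pvCounts_eq (r : List (List (String × String))) :
    pvCounts r = (((r.filter (fun p => pvGetPos p == some "QB")).length : Int),
                  ((r.filter (fun p => pvGetPos p == some "TE")).length : Int)) := by
  unfold pvCounts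
  rw [pvCounts_foldl]
  simp

-- A's apply_cap on a nonempty roster is one conditional filter
theorem pvApplyCap_eq (r : List (List (String × String))) (n : Int)
    (pool : List (List (String × String))) (pos : String) (mx d : Int) (hr : ¬ r = []) :
    pvApplyCap r n pool pos mx d =
      if mx ≤ ((r.filter (fun p => pvGetPos p == some pos)).length : Int)
          ∨ (1 ≤ ((r.filter (fun p => pvGetPos p == some pos)).length : Int) ∧ n < d) then
        pool.filter (fun p => !(pvGetPos p == some pos))
      else pool := by
  simp only [pvApplyCap, if_neg hr]
  split_ifs <;> first | rfl | omega

theorem redraft_1qb_filter_spec_aux (candidates team_roster : List (List (String × String))) (n : Int) :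
    redraft_1qb_filter candidates team_roster n = redraft_1qb_filter_alt candidates team_roster n := by
  by_cases hr : team_roster = []
  · simp [redraft_1qb_filter, redraft_1qb_filter_alt, pvApplyCap, hr]
  · simp only [redraft_1qb_filter, redraft_1qb_filter_alt, if_neg hr,
      pvApplyCap_eq _ _ _ _ _ _ hr, pvCounts_eq]
    by_cases hq : (2:Int) ≤ ((team_roster.filter (fun p => pvGetPos p == some "QB")).length : Int)
        ∨ (1 ≤ ((team_roster.filter (fun p => pvGetPos p == some "QB")).length : Int) ∧ n < 120) <;>
    by_cases ht : (2:Int) ≤ ((team_roster.filter (fun p => pvGetPos p == some "TE")).length : Int)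
        ∨ (1 ≤ ((team_roster.filter (fun p => pvGetPos p == some "TE")).length : Int) ∧ n < 100)
    · rw [if_pos hq, if_pos ht, if_pos hq, if_pos ht, List.filter_filter]
      refine List.filter_congr ?_
      intro x _
      rcases hpos : pvGetPos x with _ | s
      · simp [hpos]
      · by_cases h1 : s = "QB" <;> by_cases h2 : s = "TE" <;>
          simp [hpos, PySem.Set.add, PySem.Set.empty, PySem.Set.contains, beq_iff_eq, h1, h2]
    · rw [if_pos hq, if_neg ht, if_pos hq, if_neg ht]
      refine List.filter_congr ?_
      intro x _
      rcases hpos : pvGetPos x with _ | s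
      · simp [hpos]
      · by_cases h1 : s = "QB" <;> by_cases h2 : s = "TE" <;>
          simp [hpos, PySem.Set.add, PySem.Set.empty, PySem.Set.contains, beq_iff_eq, h1, h2]
    · rw [if_neg hq, if_pos ht, if_neg hq, if_pos ht]
      refine List.filter_congr ?_
      intro x _
      rcases hpos : pvGetPos x with _ | s
      · simp [hpos]
      · by_cases h1 : s = "QB" <;> by_cases h2 : s = "TE" <;>
          simp [hpos, PySem.Set.add, PySem.Set.empty, PySem.Set.contains, beq_iff_eq, h1, h2]
    · rw [if_neg hq, if_neg ht, if_neg hq, if_neg ht]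
      have : (fun c : List (String × String) =>
          match pvGetPos c with
          | some s => !(PySem.Set.contains (PySem.Set.empty : PySem.Set String) s)
          | none => true) = fun _ => true := by
        funext x
        rcases hpos : pvGetPos x with _ | s <;> simp [hpos, PySem.Set.contains, PySem.Set.empty]
      rw [this, List.filter_true]

-- ===== VERDICT (by name: the statement is the Claim_ definition above) =====
theorem redraft_1qb_filter_spec : Claim_equal_redraft_1qb_filter := by
  intro c r n _
  unfold Spec_redraft_1qb_filter
  exact redraft_1qb_filter_spec_aux c r n
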